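-- pv_equiv track=rewrite | github.com/echen5503/iimoc | tools_polypack/gen.py | is_hole_free
-- ===== SOURCE A (Python) =====
-- from collections import deque
-- from typing import List, Set, Tuple
--
-- DIRS4 = [(1,0), (-1,0), (0,1), (0,-1)]
--
-- Cell = Tuple[int, int]
--
-- def is_hole_free(shape: Tuple[Cell, ...]) -> bool:
--     """Flood-fill from bounding box border to detect interior voids."""
--     S = set(shape)
--     xs = [x for x,_ in S]; ys = [y for _,y in S]
--     minx, maxx = min(xs)-1, max(xs)+1
--     miny, maxy = min(ys)-1, max(ys)+1
--
--     ext = set()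
--     q = deque()
--
--     # seed the outside ring
--     for x in range(minx, maxx+1):
--         for y in (miny, maxy):
--             if (x,y) not in S:
--                 if (x,y) not in ext:
--                     ext.add((x,y)); q.append((x,y))
--     for y in range(miny, maxy+1):
--         for x in (minx, maxx):
--             if (x,y) not in S and (x,y) not in ext:
--                 ext.add((x,y)); q.append((x,y))
--
--     # BFS in empty cells to mark exterior
--     while q:
--         x,y = q.popleft()
--         for dx,dy in DIRS4:
--             nx, ny = x+dx, y+dy
--             if nx < minx or nx > maxx or ny < miny or ny > maxy:
--                 continue
--             if (nx,ny) in S or (nx,ny) in ext: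
--                 continue
--             ext.add((nx,ny)); q.append((nx,ny))
--
--     # any interior empty cell not reached => hole
--     for x in range(minx+1, maxx):
--         for y in range(miny+1, maxy):
--             if (x,y) not in S and (x,y) not in ext:
--                 return False
--     return True
-- ===== SOURCE B (Python) =====
-- def is_hole_free(shape):
--     """Hole detection by fixed-point saturation over the padded bounding box:
--     start from the border ring of empty cells and repeatedly sweep the list of
--     empty cells, absorbing any cell adjacent to the exterior, until no sweep
--     changes anything (no BFS queue)."""
--     S = set(shape)
--     xs = [x for x, _ in S]; ys = [y for _, y in S]
--     minx, maxx = min(xs) - 1, max(xs) + 1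
--     miny, maxy = min(ys) - 1, max(ys) + 1
--
--     empty = [(x, y) for x in range(minx, maxx + 1)
--                     for y in range(miny, maxy + 1) if (x, y) not in S]
--     ext = {c for c in empty
--            if c[0] == minx or c[0] == maxx or c[1] == miny or c[1] == maxy}
--
--     changed = True
--     while changed:
--         changed = False
--         for (x, y) in empty:
--             if (x, y) not in ext and ((x + 1, y) in ext or (x - 1, y) in ext
--                                       or (x, y + 1) in ext or (x, y - 1) in ext):
--                 ext.add((x, y))
--                 changed = True
--
--     return all(c in ext for c in empty
--                if minx < c[0] < maxx and miny < c[1] < maxy)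
-- ===== Notes on version B (the rewrite author's own statement) =====
-- stated objective: alternative
-- what changed: Replaces the queue-based BFS flood fill with a queueless fixed-point saturation: build the list of empty cells of the padded bounding box once, seed the exterior with the border ring, and repeatedly sweep the empty-cell list absorbing any cell adjacent to the exterior until a sweep changes nothing; Pre_ excludes only the empty shape, on which A raises ValueError (min of empty sequence).
import Mathlib
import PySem

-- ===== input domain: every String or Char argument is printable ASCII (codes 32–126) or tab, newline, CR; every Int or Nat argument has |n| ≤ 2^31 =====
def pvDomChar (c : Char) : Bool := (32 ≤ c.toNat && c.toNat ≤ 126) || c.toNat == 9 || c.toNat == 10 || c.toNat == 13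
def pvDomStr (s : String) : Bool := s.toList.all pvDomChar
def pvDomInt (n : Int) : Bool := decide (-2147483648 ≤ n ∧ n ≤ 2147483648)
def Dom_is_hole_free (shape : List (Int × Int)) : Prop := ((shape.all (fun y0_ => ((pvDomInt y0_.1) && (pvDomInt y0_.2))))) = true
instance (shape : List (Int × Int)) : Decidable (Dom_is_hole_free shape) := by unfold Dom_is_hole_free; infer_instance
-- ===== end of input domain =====

-- B replaces A's queue-based BFS flood fill by a queueless fixed-point saturation over the
-- one-time list of empty bounding-box cells (objective: alternative algorithm, not faster).
-- Python's 'ext' sets are only membership-tested, never iterated, so both ports model them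
-- exactly by Std.HashSet (membership is all that is observed; order cannot matter).

-- ===== PORT A =====
-- shared helper: both Pythons compute S and the padded bounding box by the same four lines
def pvBounds (shape : List (Int × Int)) : List (Int × Int) × Int × Int × Int × Int :=
  let S := PySem.Set.ofList shape
  let xs := S.map Prod.fst
  let ys := S.map Prod.snd
  -- min()/max() of an empty sequence raise ValueError: Pre_ excludes shape = [], so .getD 0 never fires
  (S, (PySem.List.min? xs (fun v => v)).getD 0 - 1,
      (PySem.List.max? xs (fun v => v)).getD 0 + 1,
      (PySem.List.min? ys (fun v => v)).getD 0 - 1,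
      (PySem.List.max? ys (fun v => v)).getD 0 + 1)

def pvDirs4 : List (Int × Int) := [(1, 0), (-1, 0), (0, 1), (0, -1)]

-- body of A's 'for dx,dy in DIRS4' neighbour processing: state = (ext, q)
def pvBfsStep (S : List (Int × Int)) (minx maxx miny maxy : Int) (c : Int × Int)
    (st : Std.HashSet (Int × Int) × List (Int × Int)) (d : Int × Int) :
    Std.HashSet (Int × Int) × List (Int × Int) :=
  let nx := c.1 + d.1
  let ny := c.2 + d.2
  if nx < minx ∨ nx > maxx ∨ ny < miny ∨ ny > maxy then st
  else if (nx, ny) ∈ S ∨ (nx, ny) ∈ st.1 then st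
  else (st.1.insert (nx, ny), st.2 ++ [(nx, ny)])

-- A's 'while q' BFS loop; fuel only makes the recursion structural (proved never exhausted at the call site)
def pvBfsLoop (S : List (Int × Int)) (minx maxx miny maxy : Int) :
    Nat → Std.HashSet (Int × Int) → List (Int × Int) → Std.HashSet (Int × Int)
  | _, ext, [] => ext
  | 0, ext, _ :: _ => ext
  | fuel + 1, ext, c :: rest =>
    let st := pvDirs4.foldl (pvBfsStep S minx maxx miny maxy c) (ext, rest)
    pvBfsLoop S minx maxx miny maxy fuel st.1 st.2

def pvRunA (S : List (Int × Int)) (minx maxx miny maxy : Int) : Bool :=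
  -- seed the outside ring (two loop nests; ext and q grow together)
  let st1 := (PySem.List.pyRange minx (maxx + 1) 1).foldl (fun st x =>
      [miny, maxy].foldl (fun st y =>
        if (x, y) ∈ S then st
        else if (x, y) ∈ st.1 then st
        else (st.1.insert (x, y), st.2 ++ [(x, y)])) st)
    ((∅ : Std.HashSet (Int × Int)), ([] : List (Int × Int)))
  let st2 := (PySem.List.pyRange miny (maxy + 1) 1).foldl (fun st y =>
      [minx, maxx].foldl (fun st x =>
        if (x, y) ∈ S ∨ (x, y) ∈ st.1 then st
        else (st.1.insert (x, y), st.2 ++ [(x, y)])) st) st1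
  -- BFS in empty cells to mark exterior
  let ext := pvBfsLoop S minx maxx miny maxy
    (((maxx - minx + 1) * (maxy - miny + 1)).toNat + st2.2.length) st2.1 st2.2
  -- interior scan with early 'return False'
  (PySem.List.pyRange (minx + 1) maxx 1).all (fun x =>
    (PySem.List.pyRange (miny + 1) maxy 1).all (fun y =>
      decide ((x, y) ∈ S) || decide ((x, y) ∈ ext)))

def is_hole_free (shape : List (Int × Int)) : Bool :=
  match pvBounds shape with
  | (S, minx, maxx, miny, maxy) => pvRunA S minx maxx miny maxy

-- ===== PORT B =====
-- one sweep over the empty-cell list: absorb cells adjacent to the exterior; state = (ext, changed)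
def pvSatPass (empties : List (Int × Int)) (ext : Std.HashSet (Int × Int)) :
    Std.HashSet (Int × Int) × Bool :=
  empties.foldl (fun st c =>
    if c ∉ st.1 ∧ ((c.1 + 1, c.2) ∈ st.1 ∨ (c.1 - 1, c.2) ∈ st.1 ∨
                   (c.1, c.2 + 1) ∈ st.1 ∨ (c.1, c.2 - 1) ∈ st.1)
    then (st.1.insert c, true) else st) (ext, false)

-- B's 'while changed' loop; fuel only makes the recursion structural (proved never exhausted at the call site)
def pvSatLoop (empties : List (Int × Int)) :
    Nat → Std.HashSet (Int × Int) → Std.HashSet (Int × Int)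
  | 0, ext => ext
  | fuel + 1, ext =>
    let st := pvSatPass empties ext
    if st.2 then pvSatLoop empties fuel st.1 else st.1

def pvRunB (S : List (Int × Int)) (minx maxx miny maxy : Int) : Bool :=
  let empties := (PySem.List.pyRange minx (maxx + 1) 1).flatMap (fun x =>
    ((PySem.List.pyRange miny (maxy + 1) 1).filter (fun y => decide ((x, y) ∉ S))).map (fun y => (x, y)))
  let ext0 := Std.HashSet.ofList (empties.filter (fun c =>
    decide (c.1 = minx) || decide (c.1 = maxx) || decide (c.2 = miny) || decide (c.2 = maxy)))
  let ext := pvSatLoop empties (empties.length + 1) ext0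
  (empties.filter (fun c => decide (minx < c.1 ∧ c.1 < maxx ∧ miny < c.2 ∧ c.2 < maxy))).all
    (fun c => decide (c ∈ ext))

def is_hole_free_alt (shape : List (Int × Int)) : Bool :=
  match pvBounds shape with
  | (S, minx, maxx, miny, maxy) => pvRunB S minx maxx miny maxy

-- ===== PRECONDITION & SPEC =====
-- Pre_ excludes only the empty shape, on which A's min() raises ValueError.
def Pre_is_hole_free (shape : List (Int × Int)) : Prop := shape ≠ []
instance (shape : List (Int × Int)) : Decidable (Pre_is_hole_free shape) := by unfold Pre_is_hole_free; infer_instance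
def pvWitness_is_hole_free : (List (Int × Int)) := [(0, 0)]
def Spec_is_hole_free (shape : List (Int × Int)) (out : Bool) : Prop := out = is_hole_free_alt shape
instance (shape : List (Int × Int)) (out : Bool) : Decidable (Spec_is_hole_free shape out) := by unfold Spec_is_hole_free; infer_instance

-- ===== CLAIM (what is proved, stated in full; the proofs are below) =====
def Claim_equal_is_hole_free : Prop := ∀ (shape : List (Int × Int)), Dom_is_hole_free shape → Pre_is_hole_free shape → Spec_is_hole_free shape (is_hole_free shape)

-- ===== LEMMAS AND PROOFS =====

-- proof-only vocabulary: box, emptiness, border, 4-adjacency, reachability from the border ring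
def InBoxP (minx maxx miny maxy : Int) (c : Int × Int) : Prop :=
  minx ≤ c.1 ∧ c.1 ≤ maxx ∧ miny ≤ c.2 ∧ c.2 ≤ maxy
def EmpP (S : List (Int × Int)) (minx maxx miny maxy : Int) (c : Int × Int) : Prop :=
  InBoxP minx maxx miny maxy c ∧ c ∉ S
def BorderP (minx maxx miny maxy : Int) (c : Int × Int) : Prop :=
  c.1 = minx ∨ c.1 = maxx ∨ c.2 = miny ∨ c.2 = maxy
def AdjP (c d : Int × Int) : Prop :=
  d = (c.1 + 1, c.2) ∨ d = (c.1 - 1, c.2) ∨ d = (c.1, c.2 + 1) ∨ d = (c.1, c.2 - 1)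

inductive ReachP (S : List (Int × Int)) (minx maxx miny maxy : Int) : Int × Int → Prop
  | seed (c : Int × Int) : EmpP S minx maxx miny maxy c → BorderP minx maxx miny maxy c →
      ReachP S minx maxx miny maxy c
  | step (c d : Int × Int) : ReachP S minx maxx miny maxy c → AdjP c d →
      EmpP S minx maxx miny maxy d → ReachP S minx maxx miny maxy d

lemma AdjP_symm (c d : Int × Int) (h : AdjP c d) : AdjP d c := by
  obtain ⟨cx, cy⟩ := c; obtain ⟨dx, dy⟩ := d
  simp only [AdjP, Prod.mk.injEq] at h ⊢; omega

-- HashSet basics used throughout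
lemma hmem_ofList (xs : List (Int × Int)) (a : Int × Int) :
    a ∈ Std.HashSet.ofList xs ↔ a ∈ xs := by
  simp [Std.HashSet.mem_ofList]

lemma hmem_insert (m : Std.HashSet (Int × Int)) (a b : Int × Int) :
    a ∈ m.insert b ↔ a = b ∨ a ∈ m := by
  simp [Std.HashSet.mem_insert]; tauto

lemma hsize_insert_fresh (m : Std.HashSet (Int × Int)) (a : Int × Int) (h : a ∉ m) :
    (m.insert a).size = m.size + 1 := by
  simp [Std.HashSet.size_insert, h]

lemma htoList_nodup (m : Std.HashSet (Int × Int)) : m.toList.Nodup := by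
  have h := Std.HashSet.distinct_toList (m := m)
  exact List.Pairwise.imp (by intro a b hab; simpa using hab) h

lemma toNat_mul_le (a b : Int) : a.toNat * b.toNat ≤ (a * b).toNat := by
  rcases (by omega : 0 ≤ a ∨ a < 0) with ha | ha
  · rcases (by omega : 0 ≤ b ∨ b < 0) with hb | hb
    · have h : ((a.toNat * b.toNat : Nat) : Int) = a * b := by
        push_cast
        rw [Int.toNat_of_nonneg ha, Int.toNat_of_nonneg hb]
      rw [← h, Int.toNat_natCast]
    · have h : b.toNat = 0 := by omega
      simp [h]
  · have h : a.toNat = 0 := by omega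
    simp [h]

-- cardinality bound: a nodup list of box cells has at most (W*H) elements
lemma length_le_box (minx maxx miny maxy : Int) (l : List (Int × Int))
    (hnd : l.Nodup) (hb : ∀ c ∈ l, InBoxP minx maxx miny maxy c) :
    l.length ≤ ((maxx - minx + 1) * (maxy - miny + 1)).toNat := by
  classical
  have h1 : l.toFinset ⊆ (Finset.Icc minx maxx) ×ˢ (Finset.Icc miny maxy) := by
    intro c hc
    rw [List.mem_toFinset] at hc
    obtain ⟨ha, hb2, hc2, hd⟩ := hb c hc
    simp only [Finset.mem_product, Finset.mem_Icc]
    exact ⟨⟨ha, hb2⟩, ⟨hc2, hd⟩⟩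
  have h2 : l.toFinset.card = l.length := List.toFinset_card_of_nodup hnd
  have h3 := Finset.card_le_card h1
  rw [h2, Finset.card_product, Int.card_Icc, Int.card_Icc] at h3
  have h4 := toNat_mul_le (maxx + 1 - minx) (maxy + 1 - miny)
  have h5 : (maxx + 1 - minx) * (maxy + 1 - miny) = (maxx - minx + 1) * (maxy - miny + 1) := by ring
  rw [h5] at h4
  omega

lemma hsize_le_box (minx maxx miny maxy : Int) (m : Std.HashSet (Int × Int))
    (hb : ∀ c ∈ m, InBoxP minx maxx miny maxy c) :
    m.size ≤ ((maxx - minx + 1) * (maxy - miny + 1)).toNat := by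
  rw [← Std.HashSet.length_toList]
  exact length_le_box minx maxx miny maxy m.toList (htoList_nodup m)
    (fun c hc => hb c (Std.HashSet.mem_toList.mp hc))

lemma hsize_le_of_subset (m : Std.HashSet (Int × Int)) (l : List (Int × Int))
    (h : ∀ c ∈ m, c ∈ l) : m.size ≤ l.length := by
  rw [← Std.HashSet.length_toList]
  exact List.Subperm.length_le (List.Nodup.subperm (htoList_nodup m)
    (fun c hc => h c (Std.HashSet.mem_toList.mp hc)))

-- generic seeding-fold characterisation (A's two ring loops, flattened)
def pvSeedStep (S : List (Int × Int)) (st : Std.HashSet (Int × Int) × List (Int × Int))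
    (c : Int × Int) : Std.HashSet (Int × Int) × List (Int × Int) :=
  if c ∈ S ∨ c ∈ st.1 then st else (st.1.insert c, st.2 ++ [c])

lemma seed_fold_spec (S : List (Int × Int)) (cands : List (Int × Int)) :
    ∀ st : Std.HashSet (Int × Int) × List (Int × Int), ∃ new,
      (cands.foldl (pvSeedStep S) st).2 = st.2 ++ new ∧
      (∀ x, x ∈ (cands.foldl (pvSeedStep S) st).1 ↔ x ∈ st.1 ∨ x ∈ new) ∧
      new.Nodup ∧ (∀ m ∈ new, m ∉ st.1 ∧ m ∉ S ∧ m ∈ cands) ∧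
      (∀ m ∈ cands, m ∉ S → (m ∈ st.1 ∨ m ∈ new)) := by
  induction cands with
  | nil => exact fun st => ⟨[], by simp, by simp, by simp, by simp⟩
  | cons c cs ih =>
    intro st
    simp only [List.foldl_cons]
    by_cases hc : c ∈ S ∨ c ∈ st.1
    · have hstep : pvSeedStep S st c = st := by
        simp [pvSeedStep, hc]
      rw [hstep]
      obtain ⟨new, h1, h2, h3, h4, h5⟩ := ih st
      refine ⟨new, h1, h2, h3, fun m hm => ⟨(h4 m hm).1, (h4 m hm).2.1,
        List.mem_cons_of_mem _ (h4 m hm).2.2⟩, ?_⟩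
      intro m hm hms
      rcases List.mem_cons.mp hm with rfl | hm'
      · rcases hc with hcs | hce
        · exact absurd hcs hms
        · exact Or.inl hce
      · exact h5 m hm' hms
    · push Not at hc
      have hstep : pvSeedStep S st c = (st.1.insert c, st.2 ++ [c]) := by
        simp only [pvSeedStep]
        rw [if_neg (by tauto)]
      rw [hstep]
      obtain ⟨new, h1, h2, h3, h4, h5⟩ := ih (st.1.insert c, st.2 ++ [c])
      dsimp only at h1 h2 h4 h5
      refine ⟨c :: new, ?_, ?_, ?_, ?_, ?_⟩
      · rw [h1]; simp
      · intro x
        rw [h2 x, hmem_insert]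
        simp only [List.mem_cons]
        tauto
      · refine List.nodup_cons.mpr ⟨fun hcn => ?_, h3⟩
        exact (h4 c hcn).1 ((hmem_insert _ c c).mpr (Or.inl rfl))
      · intro m hm
        rcases List.mem_cons.mp hm with rfl | hm'
        · exact ⟨hc.2, hc.1, List.mem_cons_self ..⟩
        · obtain ⟨hne, hns, hmc⟩ := h4 m hm'
          exact ⟨fun hmx => hne ((hmem_insert _ m c).mpr (Or.inr hmx)), hns,
            List.mem_cons_of_mem _ hmc⟩
      · intro m hm hms
        rcases List.mem_cons.mp hm with rfl | hm'
        · exact Or.inr (List.mem_cons_self ..)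
        · rcases h5 m hm' hms with hin | hin
          · rcases (hmem_insert _ m c).mp hin with rfl | hin'
            · exact Or.inr (List.mem_cons_self ..)
            · exact Or.inl hin'
          · exact Or.inr (List.mem_cons_of_mem _ hin)

lemma dirs_adj (c : Int × Int) : ∀ d ∈ pvDirs4, AdjP c (c.1 + d.1, c.2 + d.2) := by
  intro d hd
  fin_cases hd <;> simp [AdjP, sub_eq_add_neg]

lemma adj_dirs (c e : Int × Int) (h : AdjP c e) :
    ∃ d ∈ pvDirs4, e = (c.1 + d.1, c.2 + d.2) := by
  rcases h with h | h | h | h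
  · exact ⟨(1, 0), by simp [pvDirs4], by simpa using h⟩
  · exact ⟨(-1, 0), by simp [pvDirs4], by simpa [sub_eq_add_neg] using h⟩
  · exact ⟨(0, 1), by simp [pvDirs4], by simpa using h⟩
  · exact ⟨(0, -1), by simp [pvDirs4], by simpa [sub_eq_add_neg] using h⟩

lemma reach_subset_of_closed (S : List (Int × Int)) (minx maxx miny maxy : Int)
    (P : Int × Int → Prop)
    (hseed : ∀ c, EmpP S minx maxx miny maxy c → BorderP minx maxx miny maxy c → P c)
    (hclosed : ∀ c, P c → ∀ d, AdjP c d → EmpP S minx maxx miny maxy d → P d) :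
    ∀ m, ReachP S minx maxx miny maxy m → P m := by
  intro m hr
  induction hr with
  | seed c hc hb => exact hseed c hc hb
  | step c d _ hadj hemp ih => exact hclosed c ih d hadj hemp

-- BFS invariant
def BfsInv (S : List (Int × Int)) (minx maxx miny maxy : Int)
    (ext : Std.HashSet (Int × Int)) (q : List (Int × Int)) : Prop :=
  q.Nodup ∧ (∀ c ∈ q, c ∈ ext) ∧
  (∀ c ∈ ext, EmpP S minx maxx miny maxy c) ∧
  (∀ c ∈ ext, ReachP S minx maxx miny maxy c) ∧
  (∀ c, EmpP S minx maxx miny maxy c → BorderP minx maxx miny maxy c → c ∈ ext) ∧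
  (∀ c ∈ ext, c ∉ q → ∀ d, AdjP c d → EmpP S minx maxx miny maxy d → d ∈ ext)

lemma pvBfsStep_pos (S : List (Int × Int)) (minx maxx miny maxy : Int) (c : Int × Int)
    (st : Std.HashSet (Int × Int) × List (Int × Int)) (d : Int × Int)
    (h : EmpP S minx maxx miny maxy (c.1 + d.1, c.2 + d.2))
    (h2 : (c.1 + d.1, c.2 + d.2) ∉ st.1) :
    pvBfsStep S minx maxx miny maxy c st d =
      (st.1.insert (c.1 + d.1, c.2 + d.2), st.2 ++ [(c.1 + d.1, c.2 + d.2)]) := by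
  obtain ⟨hbox, hns⟩ := h
  simp only [InBoxP] at hbox
  simp only [pvBfsStep]
  rw [if_neg (by omega), if_neg (by tauto)]

lemma pvBfsStep_neg (S : List (Int × Int)) (minx maxx miny maxy : Int) (c : Int × Int)
    (st : Std.HashSet (Int × Int) × List (Int × Int)) (d : Int × Int)
    (h : ¬(EmpP S minx maxx miny maxy (c.1 + d.1, c.2 + d.2) ∧ (c.1 + d.1, c.2 + d.2) ∉ st.1)) :
    pvBfsStep S minx maxx miny maxy c st d = st := by
  simp only [pvBfsStep]
  by_cases h1 : (c.1 + d.1 < minx ∨ c.1 + d.1 > maxx ∨ c.2 + d.2 < miny ∨ c.2 + d.2 > maxy)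
  · rw [if_pos h1]
  · rw [if_neg h1, if_pos]
    have hbox : InBoxP minx maxx miny maxy (c.1 + d.1, c.2 + d.2) := by
      simp only [InBoxP]
      omega
    simp only [EmpP] at h
    tauto

lemma bfs_fold_spec (S : List (Int × Int)) (minx maxx miny maxy : Int) (c : Int × Int)
    (dirs : List (Int × Int)) :
    ∀ st : Std.HashSet (Int × Int) × List (Int × Int), ∃ new,
    (dirs.foldl (pvBfsStep S minx maxx miny maxy c) st).2 = st.2 ++ new ∧
    (∀ x, x ∈ (dirs.foldl (pvBfsStep S minx maxx miny maxy c) st).1 ↔ x ∈ st.1 ∨ x ∈ new) ∧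
    (dirs.foldl (pvBfsStep S minx maxx miny maxy c) st).1.size = st.1.size + new.length ∧
    new.Nodup ∧
    (∀ m ∈ new, m ∉ st.1 ∧ EmpP S minx maxx miny maxy m ∧
      ∃ d ∈ dirs, m = (c.1 + d.1, c.2 + d.2)) ∧
    (∀ d ∈ dirs, EmpP S minx maxx miny maxy (c.1 + d.1, c.2 + d.2) →
      (c.1 + d.1, c.2 + d.2) ∈ (dirs.foldl (pvBfsStep S minx maxx miny maxy c) st).1) := by
  induction dirs with
  | nil => exact fun st => ⟨[], by simp, by simp, by simp, by simp, by simp⟩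
  | cons d ds ih =>
    intro st
    simp only [List.foldl_cons]
    by_cases hcond : EmpP S minx maxx miny maxy (c.1 + d.1, c.2 + d.2) ∧
        (c.1 + d.1, c.2 + d.2) ∉ st.1
    · rw [pvBfsStep_pos S minx maxx miny maxy c st d hcond.1 hcond.2]
      obtain ⟨new, h1, h2, h3, h4, h5, h6⟩ :=
        ih (st.1.insert (c.1 + d.1, c.2 + d.2), st.2 ++ [(c.1 + d.1, c.2 + d.2)])
      dsimp only at h1 h2 h3 h5 h6
      refine ⟨(c.1 + d.1, c.2 + d.2) :: new, ?_, ?_, ?_, ?_, ?_, ?_⟩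
      · rw [h1]; simp
      · intro x
        rw [h2 x, hmem_insert]
        simp only [List.mem_cons]
        tauto
      · rw [h3, hsize_insert_fresh st.1 _ hcond.2]
        simp [Nat.add_comm, Nat.add_assoc]
      · refine List.nodup_cons.mpr ⟨fun hcn => ?_, h4⟩
        exact (h5 _ hcn).1 ((hmem_insert _ _ _).mpr (Or.inl rfl))
      · intro m hm
        rcases List.mem_cons.mp hm with rfl | hm'
        · exact ⟨hcond.2, hcond.1, d, List.mem_cons_self .., rfl⟩
        · obtain ⟨hne, hns, d', hd', hmd⟩ := h5 m hm'
          exact ⟨fun hmx => hne ((hmem_insert _ _ _).mpr (Or.inr hmx)), hns, d',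
            List.mem_cons_of_mem _ hd', hmd⟩
      · intro d' hd' hempd
        rcases List.mem_cons.mp hd' with rfl | hd''
        · rw [h2]
          exact Or.inl ((hmem_insert _ _ _).mpr (Or.inl rfl))
        · exact h6 d' hd'' hempd
    · rw [pvBfsStep_neg S minx maxx miny maxy c st d hcond]
      obtain ⟨new, h1, h2, h3, h4, h5, h6⟩ := ih st
      refine ⟨new, h1, h2, h3, h4, ?_, ?_⟩
      · intro m hm
        obtain ⟨hne, hns, d', hd', hmd⟩ := h5 m hm
        exact ⟨hne, hns, d', List.mem_cons_of_mem _ hd', hmd⟩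
      · intro d' hd' hempd
        rcases List.mem_cons.mp hd' with rfl | hd''
        · have hin : (c.1 + d'.1, c.2 + d'.2) ∈ st.1 := by tauto
          rw [h2]
          exact Or.inl hin
        · exact h6 d' hd'' hempd

lemma bfs_done (S : List (Int × Int)) (minx maxx miny maxy : Int)
    (ext : Std.HashSet (Int × Int)) (hinv : BfsInv S minx maxx miny maxy ext []) :
    ∀ m, m ∈ ext ↔ ReachP S minx maxx miny maxy m := by
  obtain ⟨-, -, -, hreach, hseed, hclosed⟩ := hinv
  intro m
  constructor
  · exact hreach m
  · exact reach_subset_of_closed S minx maxx miny maxy (· ∈ ext) hseed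
      (fun c hc d hadj hemp => hclosed c hc (by simp) d hadj hemp) m

lemma pvBfsLoop_char (S : List (Int × Int)) (minx maxx miny maxy : Int) :
    ∀ fuel ext q, BfsInv S minx maxx miny maxy ext q →
    ((maxx - minx + 1) * (maxy - miny + 1)).toNat - ext.size + q.length ≤ fuel →
    ∀ m, m ∈ pvBfsLoop S minx maxx miny maxy fuel ext q ↔ ReachP S minx maxx miny maxy m := by
  intro fuel
  induction fuel with
  | zero =>
    intro ext q hinv hfuel m
    cases q with
    | nil => exact bfs_done S minx maxx miny maxy ext hinv m
    | cons c rest =>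
      exfalso
      simp only [List.length_cons] at hfuel
      omega
  | succ fuel ih =>
    intro ext q hinv hfuel m
    cases q with
    | nil => exact bfs_done S minx maxx miny maxy ext hinv m
    | cons c rest =>
      obtain ⟨hqnd, hqe, hemp, hreach, hseed, hclosed⟩ := hinv
      obtain ⟨new, hq', hmem', hsize', hnewnd, hnewp, hcover⟩ :=
        bfs_fold_spec S minx maxx miny maxy c pvDirs4 (ext, rest)
      dsimp only at hq' hmem' hsize' hnewp hcover
      have hcext : c ∈ ext := hqe c (List.mem_cons_self ..)
      have hrest_nd : rest.Nodup := (List.nodup_cons.mp hqnd).2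
      have hrest_sub : ∀ a ∈ rest, a ∈ ext := fun a ha => hqe a (List.mem_cons_of_mem _ ha)
      set res := pvDirs4.foldl (pvBfsStep S minx maxx miny maxy c) (ext, rest) with hres
      have hinv' : BfsInv S minx maxx miny maxy res.1 res.2 := by
        rw [hq']
        refine ⟨?_, ?_, ?_, ?_, ?_, ?_⟩
        · exact List.nodup_append.mpr ⟨hrest_nd, hnewnd,
            fun a ha b hb heq => (hnewp b hb).1 (heq ▸ hrest_sub a ha)⟩
        · intro a ha
          rw [hmem']
          rcases List.mem_append.mp ha with ha' | ha'
          · exact Or.inl (hrest_sub a ha')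
          · exact Or.inr ha'
        · intro a ha
          rcases (hmem' a).mp ha with ha' | ha'
          · exact hemp a ha'
          · exact (hnewp a ha').2.1
        · intro a ha
          rcases (hmem' a).mp ha with ha' | ha'
          · exact hreach a ha'
          · obtain ⟨-, hempa, d, hd, rfl⟩ := hnewp a ha'
            exact ReachP.step c _ (hreach c hcext) (dirs_adj c d hd) hempa
        · intro a hea hba
          rw [hmem']
          exact Or.inl (hseed a hea hba)
        · intro a ha hnq e hadj hempe
          rcases (hmem' a).mp ha with ha' | ha'
          · by_cases hac : a = c
            · subst hac
              obtain ⟨d, hd, rfl⟩ := adj_dirs a e hadj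
              exact hcover d hd hempe
            · have hanr : a ∉ rest := fun har => hnq (List.mem_append.mpr (Or.inl har))
              have hnq' : a ∉ c :: rest := by
                simp only [List.mem_cons, not_or]
                exact ⟨hac, hanr⟩
              rw [hmem']
              exact Or.inl (hclosed a ha' hnq' e hadj hempe)
          · exact absurd (List.mem_append.mpr (Or.inr ha')) hnq
      have hbox' : ∀ a ∈ res.1, InBoxP minx maxx miny maxy a := by
        intro a ha
        rcases (hmem' a).mp ha with ha' | ha'
        · exact (hemp a ha').1
        · exact (hnewp a ha').2.1.1
      have hlen : res.1.size ≤ ((maxx - minx + 1) * (maxy - miny + 1)).toNat :=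
        hsize_le_box minx maxx miny maxy res.1 hbox'
      simp only [pvBfsLoop]
      apply ih res.1 res.2 hinv'
      rw [hq', hsize']
      simp only [List.length_append, List.length_cons] at hfuel ⊢
      omega

lemma adj_nbr (m : Int × Int) : AdjP (m.1 + 1, m.2) m ∧ AdjP (m.1 - 1, m.2) m ∧
    AdjP (m.1, m.2 + 1) m ∧ AdjP (m.1, m.2 - 1) m := by
  obtain ⟨mx, my⟩ := m
  simp only [AdjP, Prod.mk.injEq]
  refine ⟨Or.inr (Or.inl ?_), Or.inl ?_, ?_, ?_⟩ <;> simp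

lemma sat_fold_spec (S : List (Int × Int)) (minx maxx miny maxy : Int) :
    ∀ (empties : List (Int × Int)) (st : Std.HashSet (Int × Int) × Bool),
    (∀ m ∈ empties, EmpP S minx maxx miny maxy m) →
    (∀ c ∈ st.1, ReachP S minx maxx miny maxy c) → ∃ new,
    (empties.foldl (fun st c =>
      if c ∉ st.1 ∧ ((c.1 + 1, c.2) ∈ st.1 ∨ (c.1 - 1, c.2) ∈ st.1 ∨
                     (c.1, c.2 + 1) ∈ st.1 ∨ (c.1, c.2 - 1) ∈ st.1)
      then (st.1.insert c, true) else st) st).2 = (st.2 || !new.isEmpty) ∧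
    (∀ x, x ∈ (empties.foldl (fun st c =>
      if c ∉ st.1 ∧ ((c.1 + 1, c.2) ∈ st.1 ∨ (c.1 - 1, c.2) ∈ st.1 ∨
                     (c.1, c.2 + 1) ∈ st.1 ∨ (c.1, c.2 - 1) ∈ st.1)
      then (st.1.insert c, true) else st) st).1 ↔ x ∈ st.1 ∨ x ∈ new) ∧
    (empties.foldl (fun st c =>
      if c ∉ st.1 ∧ ((c.1 + 1, c.2) ∈ st.1 ∨ (c.1 - 1, c.2) ∈ st.1 ∨
                     (c.1, c.2 + 1) ∈ st.1 ∨ (c.1, c.2 - 1) ∈ st.1)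
      then (st.1.insert c, true) else st) st).1.size = st.1.size + new.length ∧
    (∀ m ∈ new, m ∈ empties ∧ ReachP S minx maxx miny maxy m) ∧
    (new = [] → ∀ m ∈ empties, m ∉ st.1 →
      ¬((m.1 + 1, m.2) ∈ st.1 ∨ (m.1 - 1, m.2) ∈ st.1 ∨
        (m.1, m.2 + 1) ∈ st.1 ∨ (m.1, m.2 - 1) ∈ st.1)) := by
  intro empties
  induction empties with
  | nil => exact fun st _ _ => ⟨[], by simp, by simp, by simp, by simp, by simp⟩
  | cons m ms ih =>
    intro st hemp hR
    have hm : EmpP S minx maxx miny maxy m := hemp m (List.mem_cons_self ..)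
    have hms : ∀ x ∈ ms, EmpP S minx maxx miny maxy x :=
      fun x hx => hemp x (List.mem_cons_of_mem _ hx)
    simp only [List.foldl_cons]
    by_cases hcond : m ∉ st.1 ∧ ((m.1 + 1, m.2) ∈ st.1 ∨ (m.1 - 1, m.2) ∈ st.1 ∨
        (m.1, m.2 + 1) ∈ st.1 ∨ (m.1, m.2 - 1) ∈ st.1)
    · rw [if_pos hcond]
      have hRm : ReachP S minx maxx miny maxy m := by
        obtain ⟨a1, a2, a3, a4⟩ := adj_nbr m
        rcases hcond.2 with h | h | h | h
        · exact ReachP.step _ m (hR _ h) a1 hm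
        · exact ReachP.step _ m (hR _ h) a2 hm
        · exact ReachP.step _ m (hR _ h) a3 hm
        · exact ReachP.step _ m (hR _ h) a4 hm
      have hR' : ∀ c ∈ st.1.insert m, ReachP S minx maxx miny maxy c := by
        intro c hc
        rcases (hmem_insert _ c m).mp hc with rfl | hc'
        · exact hRm
        · exact hR c hc'
      obtain ⟨new, h1, h2, h3, h4, h5⟩ := ih (st.1.insert m, true) hms hR'
      dsimp only at h1 h2 h3 h4
      refine ⟨m :: new, ?_, ?_, ?_, ?_, ?_⟩
      · rw [h1]; simp
      · intro x
        rw [h2 x, hmem_insert]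
        simp only [List.mem_cons]
        tauto
      · rw [h3, hsize_insert_fresh st.1 m hcond.1]
        simp [Nat.add_comm, Nat.add_assoc]
      · intro x hx
        rcases List.mem_cons.mp hx with rfl | hx'
        · exact ⟨List.mem_cons_self .., hRm⟩
        · exact ⟨List.mem_cons_of_mem _ (h4 x hx').1, (h4 x hx').2⟩
      · intro h
        exact absurd h (by simp)
    · rw [if_neg hcond]
      obtain ⟨new, h1, h2, h3, h4, h5⟩ := ih st hms hR
      refine ⟨new, h1, h2, h3, ?_, ?_⟩
      · intro x hx
        exact ⟨List.mem_cons_of_mem _ (h4 x hx).1, (h4 x hx).2⟩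
      · intro hnil x hx hxe
        rcases List.mem_cons.mp hx with rfl | hx'
        · tauto
        · exact h5 hnil x hx' hxe

lemma pvSatLoop_char (S : List (Int × Int)) (minx maxx miny maxy : Int)
    (empties : List (Int × Int)) (hemp : ∀ m, m ∈ empties ↔ EmpP S minx maxx miny maxy m) :
    ∀ fuel (ext : Std.HashSet (Int × Int)), (∀ c ∈ ext, c ∈ empties) →
    (∀ c ∈ ext, ReachP S minx maxx miny maxy c) →
    (∀ c, EmpP S minx maxx miny maxy c → BorderP minx maxx miny maxy c → c ∈ ext) →
    empties.length + 1 - ext.size ≤ fuel →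
    ∀ m, m ∈ pvSatLoop empties fuel ext ↔ ReachP S minx maxx miny maxy m := by
  intro fuel
  induction fuel with
  | zero =>
    intro ext hsub hR hseed hfl m
    exfalso
    have hle : ext.size ≤ empties.length := hsize_le_of_subset ext empties hsub
    omega
  | succ fuel ih =>
    intro ext hsub hR hseed hfl m
    have hempAll : ∀ x ∈ empties, EmpP S minx maxx miny maxy x := fun x hx => (hemp x).mp hx
    obtain ⟨new, hchg, hmem', hsize', hnewp, hclose⟩ :=
      sat_fold_spec S minx maxx miny maxy empties (ext, false) hempAll hR
    dsimp only at hchg hmem' hsize' hnewp hclose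
    have hpass2 : (pvSatPass empties ext).2 = (false || !new.isEmpty) := hchg
    have hpassmem : ∀ x, x ∈ (pvSatPass empties ext).1 ↔ x ∈ ext ∨ x ∈ new := hmem'
    have hpasssize : (pvSatPass empties ext).1.size = ext.size + new.length := hsize'
    simp only [pvSatLoop]
    cases hne : new with
    | nil =>
      subst hne
      rw [hpass2]
      simp only [List.isEmpty_nil, Bool.not_true, Bool.or_false, Bool.false_eq_true, if_false]
      have hexteq : ∀ x, x ∈ (pvSatPass empties ext).1 ↔ x ∈ ext := by
        intro x
        rw [hpassmem x]
        simp
      have hclosed : ∀ c, c ∈ ext → ∀ d, AdjP c d → EmpP S minx maxx miny maxy d → d ∈ ext := by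
        intro c hc d hadj hempd
        by_cases hd : d ∈ ext
        · exact hd
        · exfalso
          have hdm : d ∈ empties := (hemp d).mpr hempd
          have hno := hclose rfl d hdm hd
          have hadj' := AdjP_symm c d hadj
          rcases hadj' with h | h | h | h <;> rw [h] at hc <;> tauto
      rw [hexteq m]
      constructor
      · exact hR m
      · exact reach_subset_of_closed S minx maxx miny maxy (· ∈ ext) hseed hclosed m
    | cons n ns =>
      have hne' : new.isEmpty = false := by rw [hne]; rfl
      rw [hpass2]
      simp only [hne', Bool.not_false, Bool.or_true, if_pos]
      apply ih (pvSatPass empties ext).1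
      · intro a ha
        rcases (hpassmem a).mp ha with ha' | ha'
        · exact hsub a ha'
        · exact (hnewp a ha').1
      · intro a ha
        rcases (hpassmem a).mp ha with ha' | ha'
        · exact hR a ha'
        · exact (hnewp a ha').2
      · intro a hea hba
        rw [hpassmem a]
        exact Or.inl (hseed a hea hba)
      · have hle : (pvSatPass empties ext).1.size ≤ empties.length := by
          apply hsize_le_of_subset
          intro a ha
          rcases (hpassmem a).mp ha with ha' | ha'
          · exact hsub a ha'
          · exact (hnewp a ha').1
        have hpos : 0 < new.length := by rw [hne]; simp
        rw [hpasssize] at hle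
        rw [hpasssize]
        omega

lemma seed_body_eq (S : List (Int × Int)) (st : Std.HashSet (Int × Int) × List (Int × Int))
    (c : Int × Int) :
    (if c ∈ S then st else if c ∈ st.1 then st
     else (st.1.insert c, st.2 ++ [c])) = pvSeedStep S st c := by
  simp only [pvSeedStep]
  split_ifs <;> first | rfl | tauto

lemma foldl_flatMap' {α β γ : Type} (l : List α) (f : α → List β) (g : γ → β → γ) :
    ∀ init, (l.flatMap f).foldl g init = l.foldl (fun st a => (f a).foldl g st) init := by
  induction l with
  | nil => intro init; rfl
  | cons a l ih =>
    intro init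
    simp only [List.flatMap_cons, List.foldl_append, List.foldl_cons]
    exact ih _

lemma seedA_char (S : List (Int × Int)) (minx maxx miny maxy : Int)
    (hx : minx ≤ maxx) (hy : miny ≤ maxy) :
    ∃ e : List (Int × Int),
      ((PySem.List.pyRange miny (maxy + 1) 1).foldl (fun st y =>
        [minx, maxx].foldl (fun st x =>
          if (x, y) ∈ S ∨ (x, y) ∈ st.1 then st
          else (st.1.insert (x, y), st.2 ++ [(x, y)])) st)
        ((PySem.List.pyRange minx (maxx + 1) 1).foldl (fun st x =>
          [miny, maxy].foldl (fun st y =>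
            if (x, y) ∈ S then st
            else if (x, y) ∈ st.1 then st
            else (st.1.insert (x, y), st.2 ++ [(x, y)])) st)
          ((∅ : Std.HashSet (Int × Int)), ([] : List (Int × Int))))).2 = e ∧
      (∀ x, x ∈ ((PySem.List.pyRange miny (maxy + 1) 1).foldl (fun st y =>
        [minx, maxx].foldl (fun st x =>
          if (x, y) ∈ S ∨ (x, y) ∈ st.1 then st
          else (st.1.insert (x, y), st.2 ++ [(x, y)])) st)
        ((PySem.List.pyRange minx (maxx + 1) 1).foldl (fun st x =>
          [miny, maxy].foldl (fun st y =>
            if (x, y) ∈ S then st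
            else if (x, y) ∈ st.1 then st
            else (st.1.insert (x, y), st.2 ++ [(x, y)])) st)
          ((∅ : Std.HashSet (Int × Int)), ([] : List (Int × Int))))).1 ↔ x ∈ e) ∧
      e.Nodup ∧ ∀ m, m ∈ e ↔ (EmpP S minx maxx miny maxy m ∧ BorderP minx maxx miny maxy m) := by
  have hb1 : ((PySem.List.pyRange minx (maxx + 1) 1).foldl (fun st x =>
          [miny, maxy].foldl (fun st y =>
            if (x, y) ∈ S then st
            else if (x, y) ∈ st.1 then st
            else (st.1.insert (x, y), st.2 ++ [(x, y)])) st)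
          ((∅ : Std.HashSet (Int × Int)), ([] : List (Int × Int)))) =
      ((PySem.List.pyRange minx (maxx + 1) 1).flatMap (fun x => [(x, miny), (x, maxy)])).foldl
        (pvSeedStep S) ((∅ : Std.HashSet (Int × Int)), ([] : List (Int × Int))) := by
    rw [foldl_flatMap']
    apply List.foldl_ext
    intro st x hxr
    simp only [List.foldl_cons, List.foldl_nil, seed_body_eq]
  have hb2 : ∀ init : Std.HashSet (Int × Int) × List (Int × Int),
      ((PySem.List.pyRange miny (maxy + 1) 1).foldl (fun st y =>
        [minx, maxx].foldl (fun st x =>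
          if (x, y) ∈ S ∨ (x, y) ∈ st.1 then st
          else (st.1.insert (x, y), st.2 ++ [(x, y)])) st) init) =
      ((PySem.List.pyRange miny (maxy + 1) 1).flatMap (fun y => [(minx, y), (maxx, y)])).foldl
        (pvSeedStep S) init := by
    intro init
    rw [foldl_flatMap']
    apply List.foldl_ext
    intro st y hyr
    simp only [List.foldl_cons, List.foldl_nil, pvSeedStep]
  rw [hb1, hb2]
  obtain ⟨n1, hq1, hm1, hnd1, hp1, hc1⟩ := seed_fold_spec S
    ((PySem.List.pyRange minx (maxx + 1) 1).flatMap (fun x => [(x, miny), (x, maxy)]))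
    ((∅ : Std.HashSet (Int × Int)), ([] : List (Int × Int)))
  dsimp only at hq1 hm1 hp1 hc1
  set st1 := ((PySem.List.pyRange minx (maxx + 1) 1).flatMap
    (fun x => [(x, miny), (x, maxy)])).foldl (pvSeedStep S)
    ((∅ : Std.HashSet (Int × Int)), ([] : List (Int × Int))) with hst1
  obtain ⟨n2, hq2, hm2, hnd2, hp2, hc2⟩ := seed_fold_spec S
    ((PySem.List.pyRange miny (maxy + 1) 1).flatMap (fun y => [(minx, y), (maxx, y)])) st1
  have hm1' : ∀ x, x ∈ st1.1 ↔ x ∈ n1 := by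
    intro x
    rw [hm1 x]
    simp
  refine ⟨n1 ++ n2, ?_, ?_, ?_, ?_⟩
  · rw [hq2, hq1]
    simp
  · intro x
    rw [hm2 x, hm1' x]
    simp
  · refine List.nodup_append.mpr ⟨hnd1, hnd2, ?_⟩
    intro a ha b hb heq
    exact (hp2 b hb).1 ((hm1' b).mpr (heq ▸ ha))
  · intro m
    constructor
    · intro hm
      rcases List.mem_append.mp hm with h1 | h2
      · obtain ⟨-, hns, hmc⟩ := hp1 m h1
        simp only [List.mem_flatMap, PySem.List.mem_pyRange_one, List.mem_cons,
          List.not_mem_nil, or_false] at hmc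
        obtain ⟨x, ⟨hx1, hx2⟩, hmy⟩ := hmc
        rcases hmy with rfl | rfl
        · exact ⟨⟨⟨by omega, by omega, by omega, by omega⟩, hns⟩,
            Or.inr (Or.inr (Or.inl rfl))⟩
        · exact ⟨⟨⟨by omega, by omega, by omega, by omega⟩, hns⟩,
            Or.inr (Or.inr (Or.inr rfl))⟩
      · obtain ⟨-, hns, hmc⟩ := hp2 m h2
        simp only [List.mem_flatMap, PySem.List.mem_pyRange_one, List.mem_cons,
          List.not_mem_nil, or_false] at hmc
        obtain ⟨y, ⟨hy1, hy2⟩, hmy⟩ := hmc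
        rcases hmy with rfl | rfl
        · exact ⟨⟨⟨by omega, by omega, by omega, by omega⟩, hns⟩, Or.inl rfl⟩
        · exact ⟨⟨⟨by omega, by omega, by omega, by omega⟩, hns⟩, Or.inr (Or.inl rfl)⟩
    · rintro ⟨⟨⟨hb1', hb2', hb3', hb4'⟩, hns⟩, hbord⟩
      rcases hbord with h | h | h | h
      · have hmem : m ∈ ((PySem.List.pyRange miny (maxy + 1) 1).flatMap
            (fun y => [(minx, y), (maxx, y)])) := by
          simp only [List.mem_flatMap, PySem.List.mem_pyRange_one, List.mem_cons,
            List.not_mem_nil, or_false]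
          exact ⟨m.2, ⟨hb3', by omega⟩, Or.inl (by rw [← h])⟩
        rcases hc2 m hmem hns with hin | hin
        · exact List.mem_append.mpr (Or.inl ((hm1' m).mp hin))
        · exact List.mem_append.mpr (Or.inr hin)
      · have hmem : m ∈ ((PySem.List.pyRange miny (maxy + 1) 1).flatMap
            (fun y => [(minx, y), (maxx, y)])) := by
          simp only [List.mem_flatMap, PySem.List.mem_pyRange_one, List.mem_cons,
            List.not_mem_nil, or_false]
          exact ⟨m.2, ⟨hb3', by omega⟩, Or.inr (by rw [← h])⟩
        rcases hc2 m hmem hns with hin | hin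
        · exact List.mem_append.mpr (Or.inl ((hm1' m).mp hin))
        · exact List.mem_append.mpr (Or.inr hin)
      · have hmem : m ∈ ((PySem.List.pyRange minx (maxx + 1) 1).flatMap
            (fun x => [(x, miny), (x, maxy)])) := by
          simp only [List.mem_flatMap, PySem.List.mem_pyRange_one, List.mem_cons,
            List.not_mem_nil, or_false]
          exact ⟨m.1, ⟨hb1', by omega⟩, Or.inl (by rw [← h])⟩
        rcases hc1 m hmem hns with hin | hin
        · simp at hin
        · exact List.mem_append.mpr (Or.inl hin)
      · have hmem : m ∈ ((PySem.List.pyRange minx (maxx + 1) 1).flatMap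
            (fun x => [(x, miny), (x, maxy)])) := by
          simp only [List.mem_flatMap, PySem.List.mem_pyRange_one, List.mem_cons,
            List.not_mem_nil, or_false]
          exact ⟨m.1, ⟨hb1', by omega⟩, Or.inr (by rw [← h])⟩
        rcases hc1 m hmem hns with hin | hin
        · simp at hin
        · exact List.mem_append.mpr (Or.inl hin)

lemma pvRunA_iff (S : List (Int × Int)) (minx maxx miny maxy : Int)
    (hx : minx ≤ maxx) (hy : miny ≤ maxy) :
    (pvRunA S minx maxx miny maxy = true) ↔
    (∀ c : Int × Int, minx < c.1 → c.1 < maxx → miny < c.2 → c.2 < maxy → c ∉ S →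
      ReachP S minx maxx miny maxy c) := by
  obtain ⟨e, heq, hiff, hnd, hchar⟩ := seedA_char S minx maxx miny maxy hx hy
  have hinv : BfsInv S minx maxx miny maxy
      ((PySem.List.pyRange miny (maxy + 1) 1).foldl (fun st y =>
        [minx, maxx].foldl (fun st x =>
          if (x, y) ∈ S ∨ (x, y) ∈ st.1 then st
          else (st.1.insert (x, y), st.2 ++ [(x, y)])) st)
        ((PySem.List.pyRange minx (maxx + 1) 1).foldl (fun st x =>
          [miny, maxy].foldl (fun st y =>
            if (x, y) ∈ S then st
            else if (x, y) ∈ st.1 then st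
            else (st.1.insert (x, y), st.2 ++ [(x, y)])) st)
          ((∅ : Std.HashSet (Int × Int)), ([] : List (Int × Int))))).1 e := by
    refine ⟨hnd, ?_, ?_, ?_, ?_, ?_⟩
    · exact fun c hc => (hiff c).mpr hc
    · exact fun c hc => ((hchar c).mp ((hiff c).mp hc)).1
    · exact fun c hc => ReachP.seed c ((hchar c).mp ((hiff c).mp hc)).1
        ((hchar c).mp ((hiff c).mp hc)).2
    · exact fun c hce hcb => (hiff c).mpr ((hchar c).mpr ⟨hce, hcb⟩)
    · intro c hc hnc
      exact absurd ((hiff c).mp hc) hnc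
  have hA := pvBfsLoop_char S minx maxx miny maxy
    (((maxx - minx + 1) * (maxy - miny + 1)).toNat +
      ((PySem.List.pyRange miny (maxy + 1) 1).foldl (fun st y =>
        [minx, maxx].foldl (fun st x =>
          if (x, y) ∈ S ∨ (x, y) ∈ st.1 then st
          else (st.1.insert (x, y), st.2 ++ [(x, y)])) st)
        ((PySem.List.pyRange minx (maxx + 1) 1).foldl (fun st x =>
          [miny, maxy].foldl (fun st y =>
            if (x, y) ∈ S then st
            else if (x, y) ∈ st.1 then st
            else (st.1.insert (x, y), st.2 ++ [(x, y)])) st)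
          ((∅ : Std.HashSet (Int × Int)), ([] : List (Int × Int))))).2.length) _ _
    (heq ▸ hinv) (by rw [heq]; omega)
  simp only [pvRunA]
  simp only [List.all_eq_true, Bool.or_eq_true, decide_eq_true_eq,
    PySem.List.mem_pyRange_one, hA]
  constructor
  · intro h c h1 h2 h3 h4 h5
    have hc := h c.1 ⟨by omega, by omega⟩ c.2 ⟨by omega, by omega⟩
    rcases hc with hc | hc
    · exact absurd hc h5
    · exact hc
  · intro h x hx' y hy'
    by_cases hxy : (x, y) ∈ S
    · exact Or.inl hxy
    · exact Or.inr (h (x, y) (by omega) (by omega) (by omega) (by omega) hxy)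

lemma pvRunB_iff (S : List (Int × Int)) (minx maxx miny maxy : Int) :
    (pvRunB S minx maxx miny maxy = true) ↔
    (∀ c : Int × Int, minx < c.1 → c.1 < maxx → miny < c.2 → c.2 < maxy → c ∉ S →
      ReachP S minx maxx miny maxy c) := by
  have hempiff : ∀ m, m ∈ ((PySem.List.pyRange minx (maxx + 1) 1).flatMap (fun x =>
      ((PySem.List.pyRange miny (maxy + 1) 1).filter (fun y => decide ((x, y) ∉ S))).map
        (fun y => (x, y)))) ↔ EmpP S minx maxx miny maxy m := by
    intro m
    simp only [List.mem_flatMap, List.mem_map, List.mem_filter,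
      PySem.List.mem_pyRange_one, decide_eq_true_eq]
    constructor
    · rintro ⟨x, ⟨hx1, hx2⟩, y, ⟨⟨hy1, hy2⟩, hyS⟩, rfl⟩
      exact ⟨⟨by omega, by omega, by omega, by omega⟩, hyS⟩
    · rintro ⟨⟨h1, h2, h3, h4⟩, hns⟩
      exact ⟨m.1, ⟨h1, by omega⟩, m.2, ⟨⟨h3, by omega⟩, by simpa using hns⟩, rfl⟩
  have hext0 : ∀ m, m ∈ Std.HashSet.ofList (((PySem.List.pyRange minx (maxx + 1) 1).flatMap
      (fun x => ((PySem.List.pyRange miny (maxy + 1) 1).filter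
        (fun y => decide ((x, y) ∉ S))).map (fun y => (x, y)))).filter (fun c =>
      decide (c.1 = minx) || decide (c.1 = maxx) || decide (c.2 = miny) || decide (c.2 = maxy))) ↔
      (EmpP S minx maxx miny maxy m ∧ BorderP minx maxx miny maxy m) := by
    intro m
    rw [hmem_ofList, List.mem_filter]
    simp only [Bool.or_eq_true, decide_eq_true_eq, hempiff, BorderP]
    tauto
  have hB := pvSatLoop_char S minx maxx miny maxy _ hempiff
    (((PySem.List.pyRange minx (maxx + 1) 1).flatMap (fun x =>
      ((PySem.List.pyRange miny (maxy + 1) 1).filter (fun y => decide ((x, y) ∉ S))).map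
        (fun y => (x, y)))).length + 1)
    (Std.HashSet.ofList (((PySem.List.pyRange minx (maxx + 1) 1).flatMap
      (fun x => ((PySem.List.pyRange miny (maxy + 1) 1).filter
        (fun y => decide ((x, y) ∉ S))).map (fun y => (x, y)))).filter (fun c =>
      decide (c.1 = minx) || decide (c.1 = maxx) || decide (c.2 = miny) || decide (c.2 = maxy))))
    (fun c hc => (hempiff c).mpr ((hext0 c).mp hc).1)
    (fun c hc => ReachP.seed c ((hext0 c).mp hc).1 ((hext0 c).mp hc).2)
    (fun c he hb => (hext0 c).mpr ⟨he, hb⟩)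
    (by omega)
  simp only [pvRunB]
  simp only [List.all_eq_true, List.mem_filter, decide_eq_true_eq, hB, hempiff]
  constructor
  · intro h c h1 h2 h3 h4 h5
    exact h c ⟨⟨⟨by omega, by omega, by omega, by omega⟩, h5⟩, by omega, by omega, by omega, by omega⟩
  · rintro h c ⟨⟨⟨hc1, hc2, hc3, hc4⟩, hcs⟩, hi1, hi2, hi3, hi4⟩
    exact h c hi1 hi2 hi3 hi4 hcs

-- main core: after identical bounds, both runs decide the same proposition
lemma pvRun_eq (S : List (Int × Int)) (minx maxx miny maxy : Int)
    (hx : minx ≤ maxx) (hy : miny ≤ maxy) :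
    pvRunA S minx maxx miny maxy = pvRunB S minx maxx miny maxy := by
  rw [Bool.eq_iff_iff, pvRunA_iff S minx maxx miny maxy hx hy, pvRunB_iff S minx maxx miny maxy]

lemma minmax_le (xs : List Int) (hne : xs ≠ []) :
    (PySem.List.min? xs (fun v => v)).getD 0 - 1 ≤ (PySem.List.max? xs (fun v => v)).getD 0 + 1 := by
  obtain ⟨a, ha⟩ : ∃ a, PySem.List.min? xs (fun v => v) = some a := by
    cases heq : PySem.List.min? xs (fun v => v) with
    | none => exact absurd ((PySem.List.min?_eq_none_iff xs _).mp heq) hne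
    | some a => exact ⟨a, rfl⟩
  obtain ⟨b, hbq⟩ : ∃ b, PySem.List.max? xs (fun v => v) = some b := by
    cases heq : PySem.List.max? xs (fun v => v) with
    | none => exact absurd ((PySem.List.max?_eq_none_iff xs _).mp heq) hne
    | some b => exact ⟨b, rfl⟩
  have hab : a ≤ b := PySem.List.min?_isMin ha b (PySem.List.max?_mem hbq)
  rw [ha, hbq]
  simp only [Option.getD_some]
  omega

lemma pvBounds_le (shape : List (Int × Int)) (h : shape ≠ []) :
    (pvBounds shape).2.1 ≤ (pvBounds shape).2.2.1 ∧
    (pvBounds shape).2.2.2.1 ≤ (pvBounds shape).2.2.2.2 := by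
  have hS : (PySem.Set.ofList shape) ≠ [] := by
    cases shape with
    | nil => exact absurd rfl h
    | cons p r =>
      intro he
      have hm : p ∈ PySem.Set.ofList (p :: r) := (PySem.Set.mem_ofList _ _).mpr (List.mem_cons_self ..)
      rw [he] at hm
      exact absurd hm (List.not_mem_nil)
  unfold pvBounds
  refine ⟨minmax_le _ ?_, minmax_le _ ?_⟩ <;>
    simpa [List.map_eq_nil_iff] using hS

-- ===== VERDICT (by name: the statement is the Claim_ definition above) =====
theorem is_hole_free_spec : Claim_equal_is_hole_free := by
  intro shape _ hpre
  unfold Spec_is_hole_free is_hole_free is_hole_free_alt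
  have h := pvBounds_le shape hpre
  rcases hb : pvBounds shape with ⟨S, minx, maxx, miny, maxy⟩
  rw [hb] at h
  exact pvRun_eq S minx maxx miny maxy h.1 h.2
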